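-- pv_equiv track=rewrite | github.com/mishrakeshav/Competitive-Programming | binarysearch.io/805_randomized_binary_search.py | solve
-- ===== SOURCE A (Python) =====
-- def solve(nums):
--     n = len(nums)
--     if n==0:
--         return n
--     from collections import Counter
--     freq = Counter(nums)
--
--     l_max = [i for i in nums]
--     r_min = [i for i in nums]
--
--     for i in range(1,n):
--         l_max[i] = max(l_max[i-1],l_max[i])
--
--     for i in range(n-2,-1,-1):
--         r_min[i] = min(r_min[i+1],r_min[i])
--
--     ans = 0
--     for i in range(n):
--         if freq[nums[i]]==1 and r_min[i]==l_max[i]==nums[i]: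
--             ans += 1
--
--     return ans
-- ===== SOURCE B (Python) =====
-- def solve(nums):
--     # Simpler decomposition: a position counts iff its value is strictly greater
--     # than everything before it and strictly less than everything after it.
--     return sum(
--         1
--         for i, x in enumerate(nums)
--         if all(y < x for y in nums[:i]) and all(x < y for y in nums[i + 1:])
--     )
-- ===== Notes on version B (the rewrite author's own statement) =====
-- stated objective: simpler
-- what changed: B drops A's Counter and the two in-place prefix-max/suffix-min array passes and instead counts positions whose value is strictly greater than every earlier element and strictly less than every later element, as one comprehension over enumerate.
import Mathlib
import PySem

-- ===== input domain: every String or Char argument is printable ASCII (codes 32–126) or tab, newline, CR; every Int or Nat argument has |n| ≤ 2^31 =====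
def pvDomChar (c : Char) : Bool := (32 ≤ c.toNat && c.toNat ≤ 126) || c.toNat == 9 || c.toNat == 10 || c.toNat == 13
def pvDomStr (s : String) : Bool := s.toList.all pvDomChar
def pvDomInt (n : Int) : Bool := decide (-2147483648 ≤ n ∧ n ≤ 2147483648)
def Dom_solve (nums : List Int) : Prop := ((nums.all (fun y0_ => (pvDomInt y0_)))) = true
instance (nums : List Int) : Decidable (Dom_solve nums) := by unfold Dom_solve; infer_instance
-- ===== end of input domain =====

-- B replaces A's Counter + in-place prefix-max/suffix-min array passes by one direct
-- per-position test (strictly above everything before it, strictly below everything after): simpler decomposition.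


-- ===== PORT A =====
def solve (nums : List Int) : Int :=
  let n : Int := PySem.List.len nums
  if n == 0 then n
  else
    let freq := PySem.Dict.counter nums
    let lmax0 := nums.map (fun i => i)
    let rmin0 := nums.map (fun i => i)
    let lmax := (PySem.List.pyRange 1 n 1).foldl
      (fun l i => l.set i.toNat (max (PySem.List.pyGetD l (i-1) 0) (PySem.List.pyGetD l i 0))) lmax0
    let rmin := (PySem.List.pyRange (n-2) (-1) (-1)).foldl
      (fun l i => l.set i.toNat (min (PySem.List.pyGetD l (i+1) 0) (PySem.List.pyGetD l i 0))) rmin0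
    (PySem.List.pyRange 0 n 1).foldl
      (fun ans i =>
        if freq.getD (PySem.List.pyGetD nums i 0) 0 == 1 &&
           PySem.List.pyGetD rmin i 0 == PySem.List.pyGetD lmax i 0 &&
           PySem.List.pyGetD lmax i 0 == PySem.List.pyGetD nums i 0
        then ans + 1 else ans) 0

-- ===== PORT B =====
def solve_alt (nums : List Int) : Int :=
  ((PySem.List.enumerate nums 0).countP (fun p =>
      (PySem.List.slice nums none (some p.1)).all (fun y => y < p.2) &&
      (PySem.List.slice nums (some (p.1 + 1)) none).all (fun y => p.2 < y)) : Int)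

-- ===== PRECONDITION & SPEC =====
def Spec_solve (nums : List Int) (out : Int) : Prop := out = solve_alt nums
instance (nums : List Int) (out : Int) : Decidable (Spec_solve nums out) := by unfold Spec_solve; infer_instance

-- ===== CLAIM (what is proved, stated in full; the proofs are below) =====
def Claim_equal_solve : Prop := ∀ (nums : List Int), Dom_solve nums → Spec_solve nums (solve nums)

-- ===== LEMMAS AND PROOFS =====

-- running prefix maximum: pm nums i = max(nums[0..i])
def pm (nums : List Int) : Nat → Int
  | 0 => nums.getD 0 0
  | i+1 => max (pm nums i) (nums.getD (i+1) 0)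

-- running suffix minimum from the right end: smA nums k = min of the last k+1 elements
def smA (nums : List Int) : Nat → Int
  | 0 => nums.getD (nums.length - 1) 0
  | k+1 => min (smA nums k) (nums.getD (nums.length - 2 - k) 0)

-- sm nums i = min(nums[i..])
def sm (nums : List Int) (i : Nat) : Int := smA nums (nums.length - 1 - i)

lemma getD_eq_getElem' (nums : List Int) (k : Nat) (hk : k < nums.length) :
    nums.getD k 0 = nums[k] := by
  simp [List.getD_eq_getElem?_getD, List.getElem?_eq_getElem hk]

lemma take_succ_of_lt (nums : List Int) (k : Nat) (hk : k < nums.length) :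
    nums.take (k+1) = nums.take k ++ [nums.getD k 0] := by
  rw [List.take_add_one, List.getElem?_eq_getElem hk]
  simp [List.getD_eq_getElem?_getD, List.getElem?_eq_getElem hk]

lemma drop_cons_of_lt (nums : List Int) (k : Nat) (hk : k < nums.length) :
    nums.drop k = nums.getD k 0 :: nums.drop (k+1) := by
  rw [getD_eq_getElem' nums k hk]
  exact List.drop_eq_getElem_cons hk

lemma getD_append_right' (A B : List Int) (k : Nat) (hk : A.length ≤ k) (d : Int) :
    (A ++ B).getD k d = B.getD (k - A.length) d := by
  simp [List.getD_eq_getElem?_getD, List.getElem?_append_right hk]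

lemma set_append_len (A B : List Int) (v : Int) : (A ++ B).set A.length v = A ++ B.set 0 v := by
  simp

lemma getD_map_range' (f : Nat → Int) (n k : Nat) (hk : k < n) :
    ((List.range n).map f).getD k 0 = f k := by
  simp [List.getD_eq_getElem?_getD, hk]

lemma pm_mem (nums : List Int) (k : Nat) (hk : k < nums.length) :
    pm nums k ∈ nums.take (k+1) := by
  induction k with
  | zero =>
    rw [take_succ_of_lt nums 0 hk]
    simp [pm]
  | succ i ih =>
    rw [take_succ_of_lt nums (i+1) hk, pm]
    rcases max_cases (pm nums i) (nums.getD (i+1) 0) with ⟨h, _⟩ | ⟨h, _⟩ <;> rw [h]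
    · exact List.mem_append_left _ (ih (by omega))
    · simp

lemma pm_ub (nums : List Int) (k : Nat) (hk : k < nums.length) :
    ∀ y ∈ nums.take (k+1), y ≤ pm nums k := by
  induction k with
  | zero =>
    rw [take_succ_of_lt nums 0 hk]; simp [pm]
  | succ i ih =>
    rw [take_succ_of_lt nums (i+1) hk, pm]
    intro y hy
    rcases List.mem_append.1 hy with h | h
    · exact le_trans (ih (by omega) y h) (le_max_left _ _)
    · simp at h; subst h; exact le_max_right _ _

lemma smA_mem (nums : List Int) (k : Nat) (hk : k < nums.length) :
    smA nums k ∈ nums.drop (nums.length - 1 - k) := by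
  induction k with
  | zero =>
    rw [drop_cons_of_lt nums (nums.length - 1 - 0) (by omega)]
    simp [smA]
  | succ i ih =>
    have h1 : nums.length - 1 - (i+1) = nums.length - 2 - i := by omega
    rw [h1, drop_cons_of_lt nums (nums.length - 2 - i) (by omega)]
    have h2 : nums.length - 2 - i + 1 = nums.length - 1 - i := by omega
    rw [h2, smA]
    rcases min_cases (smA nums i) (nums.getD (nums.length - 2 - i) 0) with ⟨h, _⟩ | ⟨h, _⟩ <;> rw [h]
    · exact List.mem_cons_of_mem _ (ih (by omega))
    · exact List.mem_cons_self

lemma smA_lb (nums : List Int) (k : Nat) (hk : k < nums.length) :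
    ∀ y ∈ nums.drop (nums.length - 1 - k), smA nums k ≤ y := by
  induction k with
  | zero =>
    rw [drop_cons_of_lt nums (nums.length - 1 - 0) (by omega)]
    have h0 : nums.drop (nums.length - 1 - 0 + 1) = [] := by
      apply List.drop_eq_nil_of_le; omega
    rw [h0]; simp [smA]
  | succ i ih =>
    have h1 : nums.length - 1 - (i+1) = nums.length - 2 - i := by omega
    rw [h1, drop_cons_of_lt nums (nums.length - 2 - i) (by omega)]
    have h2 : nums.length - 2 - i + 1 = nums.length - 1 - i := by omega
    rw [h2, smA]
    intro y hy
    rcases List.mem_cons.1 hy with h | h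
    · subst h; exact min_le_right _ _
    · exact le_trans (min_le_left _ _) (ih (by omega) y h)

lemma sm_mem (nums : List Int) (k : Nat) (hk : k < nums.length) :
    sm nums k ∈ nums.drop k := by
  have h := smA_mem nums (nums.length - 1 - k) (by omega)
  rw [show nums.length - 1 - (nums.length - 1 - k) = k by omega] at h
  exact h

lemma sm_lb (nums : List Int) (k : Nat) (hk : k < nums.length) :
    ∀ y ∈ nums.drop k, sm nums k ≤ y := by
  have h := smA_lb nums (nums.length - 1 - k) (by omega)
  rw [show nums.length - 1 - (nums.length - 1 - k) = k by omega] at h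
  exact h

-- A's first loop: l_max becomes the list of inclusive prefix maxima
lemma lmax_loop (nums : List Int) (k : Nat) (hk : k < nums.length) :
    (PySem.List.pyRange 1 (1 + (k:Int)) 1).foldl
      (fun l i => l.set i.toNat (max (PySem.List.pyGetD l (i-1) 0) (PySem.List.pyGetD l i 0))) nums
    = ((List.range (k+1)).map (pm nums)) ++ nums.drop (k+1) := by
  induction k with
  | zero =>
    rw [show (1 + ((0:Nat):Int)) = 1 by norm_num, PySem.List.pyRange_one_eq_nil (le_refl 1)]
    rw [List.foldl_nil]
    have h := drop_cons_of_lt nums 0 hk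
    simp only [List.drop_zero] at h
    simpa [pm] using h
  | succ i ih =>
    rw [show (1 + ((i+1:Nat):Int)) = (1 + (i:Int)) + 1 by omega,
        PySem.List.pyRange_one_succ_right (by omega : (1:Int) ≤ 1 + (i:Int)),
        List.foldl_append, ih (by omega)]
    simp only [List.foldl_cons, List.foldl_nil]
    set L := ((List.range (i+1)).map (pm nums)) ++ nums.drop (i+1) with hL
    have hlen : ((List.range (i+1)).map (pm nums)).length = i + 1 := by simp
    have e1 : (1 + (i:Int)) - 1 = ((i:Nat):Int) := by omega
    have e2 : (1 + (i:Int)) = (((i+1:Nat)):Int) := by push_cast; ring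
    have g1 : PySem.List.pyGetD L ((1 + (i:Int)) - 1) 0 = pm nums i := by
      rw [e1, PySem.List.pyGetD_natCast, hL, List.getD_append _ _ 0 i (by omega)]
      simp [List.getD_eq_getElem?_getD]
    have g2 : PySem.List.pyGetD L (1 + (i:Int)) 0 = nums.getD (i+1) 0 := by
      rw [e2, PySem.List.pyGetD_natCast, hL, getD_append_right' _ _ _ (by omega)]
      rw [hlen, Nat.sub_self, drop_cons_of_lt nums (i+1) hk]
      simp [List.getD_eq_getElem?_getD]
    rw [g1, g2]
    have e3 : (1 + (i:Int)).toNat = i + 1 := by omega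
    have hset := set_append_len ((List.range (i+1)).map (pm nums)) (nums.drop (i+1))
      (max (pm nums i) (nums.getD (i+1) 0))
    rw [hlen] at hset
    rw [e3, hL, hset, drop_cons_of_lt nums (i+1) hk]
    simp only [List.set_cons_zero]
    rw [List.range_succ, List.map_append, List.range_succ, List.map_append]
    simp [pm, List.getD_eq_getElem?_getD]
    rw [List.range_succ, List.map_append]
    simp

-- one backward step of the suffix minimum
lemma sm_step (nums : List Int) (m : Nat) (hm : m + 1 < nums.length) :
    min (sm nums (m+1)) (nums.getD m 0) = sm nums m := by
  unfold sm
  rw [show nums.length - 1 - m = (nums.length - 2 - m) + 1 by omega, smA]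
  congr 2
  · omega
  · omega

lemma S_cons (nums : List Int) (m : Nat) (hm : m + 1 ≤ nums.length) :
    (List.range (nums.length - m)).map (fun j => sm nums (m+j))
    = sm nums m :: (List.range (nums.length - (m+1))).map (fun j => sm nums ((m+1)+j)) := by
  rw [show nums.length - m = (nums.length - (m+1)) + 1 by omega, List.range_succ_eq_map]
  simp [List.map_map, Function.comp]
  intro a _
  congr 1
  omega

-- A's second loop: r_min becomes the list of inclusive suffix minima
lemma rmin_loop (nums : List Int) (m : Nat) (hm : m < nums.length) :
    (PySem.List.pyRange ((m:Int) - 1) (-1) (-1)).foldl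
      (fun l i => l.set i.toNat (min (PySem.List.pyGetD l (i+1) 0) (PySem.List.pyGetD l i 0)))
      (nums.take m ++ (List.range (nums.length - m)).map (fun j => sm nums (m+j)))
    = (List.range nums.length).map (sm nums) := by
  induction m with
  | zero =>
    rw [show ((0:Nat):Int) - 1 = (-1 : Int) by norm_num,
        PySem.List.pyRange_neg_one_eq_nil (le_refl (-1 : Int)), List.foldl_nil]
    simp
  | succ m ih =>
    rw [show (((m+1:Nat)):Int) - 1 = (m:Int) by push_cast; ring,
        PySem.List.pyRange_neg_one_cons (by omega : (-1:Int) < (m:Int)), List.foldl_cons]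
    set S1 := (List.range (nums.length - (m+1))).map (fun j => sm nums ((m+1)+j)) with hS1
    have hlent : (nums.take (m+1)).length = m + 1 := by
      simp; omega
    have g2 : PySem.List.pyGetD (nums.take (m+1) ++ S1) ((m:Int)+1) 0 = sm nums (m+1) := by
      rw [show ((m:Int)+1) = (((m+1:Nat)):Int) by push_cast; ring, PySem.List.pyGetD_natCast,
          getD_append_right' _ _ _ (by omega), hlent, Nat.sub_self]
      rw [hS1, List.getD_eq_getElem?_getD]
      simp [show 0 < nums.length - (m+1) by omega]
    have g1 : PySem.List.pyGetD (nums.take (m+1) ++ S1) ((m:Int)) 0 = nums.getD m 0 := by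
      rw [PySem.List.pyGetD_natCast, List.getD_append _ _ 0 m (by omega)]
      rw [List.getD_eq_getElem?_getD, List.getElem?_take_of_lt (by omega), ← List.getD_eq_getElem?_getD]
    rw [g2, g1, show ((m:Int)).toNat = m from Int.toNat_natCast m]
    rw [take_succ_of_lt nums m (by omega), List.append_assoc]
    have hset := set_append_len (nums.take m) ([nums.getD m 0] ++ S1)
      (min (sm nums (m+1)) (nums.getD m 0))
    rw [show (nums.take m).length = m by simp; omega] at hset
    rw [hset]
    simp only [List.singleton_append, List.set_cons_zero]
    rw [sm_step nums m hm, hS1, ← S_cons nums m (by omega)]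
    exact ih (by omega)

-- A's per-index test equals B's per-index test
lemma cond_eq (nums : List Int) (k : Nat) (hk : k < nums.length) :
    (((nums.count (nums.getD k 0) : Int) == 1) &&
       (sm nums k == pm nums k) && (pm nums k == nums.getD k 0))
    = (((nums.take k).all (fun y => y < nums.getD k 0)) &&
       ((nums.drop (k+1)).all (fun y => nums.getD k 0 < y))) := by
  set x := nums.getD k 0 with hx
  have hsplit : nums = nums.take k ++ x :: nums.drop (k+1) := by
    conv_lhs => rw [← List.take_append_drop k nums]
    rw [drop_cons_of_lt nums k hk]
  have hcount : nums.count x = (nums.take k).count x + (1 + (nums.drop (k+1)).count x) := by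
    conv_lhs => rw [hsplit]
    simp [List.count_append]
    ring
  have htk : nums.take (k+1) = nums.take k ++ [x] := take_succ_of_lt nums k hk
  have hdk : nums.drop k = x :: nums.drop (k+1) := drop_cons_of_lt nums k hk
  rw [Bool.eq_iff_iff]
  simp only [Bool.and_eq_true, beq_iff_eq, List.all_eq_true, decide_eq_true_eq]
  constructor
  · rintro ⟨⟨h1, h2⟩, h3⟩
    have hc : nums.count x = 1 := by exact_mod_cast h1
    constructor
    · intro y hy
      have hle : y ≤ x := h3 ▸ pm_ub nums k hk y (htk ▸ List.mem_append_left _ hy)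
      rcases lt_or_eq_of_le hle with h | h
      · exact h
      · exfalso
        have : 1 ≤ (nums.take k).count x := List.one_le_count_iff.2 (h ▸ hy)
        omega
    · intro y hy
      have hge : x ≤ y := by
        have h := sm_lb nums k hk y (hdk ▸ List.mem_cons_of_mem _ hy)
        rw [h2, h3] at h
        exact h
      rcases lt_or_eq_of_le hge with h | h
      · exact h
      · exfalso
        have : 1 ≤ (nums.drop (k+1)).count x := List.one_le_count_iff.2 (h ▸ hy)
        omega
  · rintro ⟨hb, ha⟩
    have hxtk : x ∈ nums.take (k+1) := htk ▸ List.mem_append_right _ (List.mem_singleton.2 rfl)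
    have hxdk : x ∈ nums.drop k := hdk ▸ List.mem_cons_self
    have hpm : pm nums k = x := by
      apply le_antisymm
      · rcases List.mem_append.1 (htk ▸ pm_mem nums k hk) with h | h
        · exact le_of_lt (hb _ h)
        · exact le_of_eq (List.mem_singleton.1 h)
      · exact pm_ub nums k hk x hxtk
    have hsm : sm nums k = x := by
      apply le_antisymm
      · exact sm_lb nums k hk x hxdk
      · rcases List.mem_cons.1 (hdk ▸ sm_mem nums k hk) with h | h
        · exact le_of_eq h.symm
        · exact le_of_lt (ha _ h)
    refine ⟨⟨?_, by rw [hsm, hpm]⟩, hpm⟩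
    have c1 : (nums.take k).count x = 0 := by
      rw [List.count_eq_zero]
      intro h
      exact absurd rfl (ne_of_lt (hb _ h))
    have c2 : (nums.drop (k+1)).count x = 0 := by
      rw [List.count_eq_zero]
      intro h
      exact absurd rfl (ne_of_gt (ha _ h))
    rw [hcount, c1, c2]
    norm_num

lemma lmax_full (nums : List Int) (hn : 0 < nums.length) :
    (PySem.List.pyRange 1 ((nums.length:Int)) 1).foldl
      (fun l i => l.set i.toNat (max (PySem.List.pyGetD l (i-1) 0) (PySem.List.pyGetD l i 0))) nums
    = (List.range nums.length).map (pm nums) := by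
  have h := lmax_loop nums (nums.length - 1) (by omega)
  rw [show (1:Int) + ((nums.length - 1 : Nat):Int) = ((nums.length:Int)) by omega,
      show nums.length - 1 + 1 = nums.length by omega, List.drop_length, List.append_nil] at h
  exact h

lemma rmin_full (nums : List Int) (hn : 0 < nums.length) :
    (PySem.List.pyRange ((nums.length:Int) - 2) (-1) (-1)).foldl
      (fun l i => l.set i.toNat (min (PySem.List.pyGetD l (i+1) 0) (PySem.List.pyGetD l i 0))) nums
    = (List.range nums.length).map (sm nums) := by
  have h := rmin_loop nums (nums.length - 1) (by omega)
  have hinit : nums.take (nums.length - 1) ++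
      (List.range (nums.length - (nums.length - 1))).map (fun j => sm nums ((nums.length - 1)+j)) = nums := by
    rw [show nums.length - (nums.length - 1) = 1 by omega, List.range_one, List.map_singleton]
    have e : sm nums (nums.length - 1 + 0) = nums.getD (nums.length - 1) 0 := by
      simp [sm, smA]
    rw [e, ← take_succ_of_lt nums (nums.length - 1) (by omega),
        show nums.length - 1 + 1 = nums.length by omega, List.take_length]
  rw [hinit, show ((nums.length - 1 : Nat):Int) - 1 = ((nums.length:Int)) - 2 by omega] at h
  exact h

theorem solve_eq (nums : List Int) : solve nums = solve_alt nums := by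
  by_cases hnil : nums = []
  · subst hnil; rfl
  · have hn : 0 < nums.length := List.length_pos_iff.2 hnil
    unfold solve
    simp only [PySem.List.len_eq, List.map_id']
    have hne : (((nums.length:Int)) == 0) = false := by simp; omega
    rw [hne]
    simp only [Bool.false_eq_true, if_false]
    rw [lmax_full nums hn, rmin_full nums hn]
    rw [PySem.List.foldl_if_add_one, zero_add, PySem.List.pyRange_zero_natCast, List.countP_map]
    unfold solve_alt
    rw [PySem.List.enumerate_eq_map_pyRange nums 0, List.countP_map, PySem.List.len_eq,
        PySem.List.pyRange_zero_natCast, List.countP_map]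
    congr 1
    apply List.countP_congr
    intro k hkmem
    have hk : k < nums.length := List.mem_range.1 hkmem
    simp only [Function.comp]
    simp only [PySem.List.pyGetD_natCast, PySem.Dict.getD_counter,
      PySem.List.slice_to_natCast,
      getD_map_range' (sm nums) nums.length k hk, getD_map_range' (pm nums) nums.length k hk,
      show ((k:Int) + 1) = ((k+1 : Nat) : Int) by push_cast; ring,
      PySem.List.slice_from_natCast]
    rw [cond_eq nums k hk]

-- ===== VERDICT (by name: the statement is the Claim_ definition above) =====
theorem solve_spec : Claim_equal_solve := by
  intro nums _
  unfold Spec_solve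
  exact solve_eq nums
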